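-- pv_equiv track=rewrite | github.com/jexxme/cloverpit-save-editor | tools/decrypt_cloverpit.py | _CryptoShiftsNumber
-- ===== SOURCE A (Python) =====
-- def _CryptoShiftsNumber(password):
--     """Calculate number of encryption iterations based on password"""
--     num = 8
--     for char in password:
--         num += ord(char)
--
--     while num > 16 or num < 8:
--         if num > 16:
--             num -= 16
--         if num < 8:
--             num += 8
--
--     return num
-- ===== SOURCE B (Python) =====
-- def _CryptoShiftsNumber(password):
--     """Calculate number of encryption iterations based on password"""
--     r = sum(map(ord, password)) % 16
--     return r if r > 8 else r + 8
-- ===== Notes on version B (the rewrite author's own statement) =====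
-- stated objective: faster
-- what changed: Replaces A's iterative subtract-16/add-8 normalisation loop (O(S) steps in the ord-sum S) with a closed-form mod-16 reduction of the ord sum.
import Mathlib
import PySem

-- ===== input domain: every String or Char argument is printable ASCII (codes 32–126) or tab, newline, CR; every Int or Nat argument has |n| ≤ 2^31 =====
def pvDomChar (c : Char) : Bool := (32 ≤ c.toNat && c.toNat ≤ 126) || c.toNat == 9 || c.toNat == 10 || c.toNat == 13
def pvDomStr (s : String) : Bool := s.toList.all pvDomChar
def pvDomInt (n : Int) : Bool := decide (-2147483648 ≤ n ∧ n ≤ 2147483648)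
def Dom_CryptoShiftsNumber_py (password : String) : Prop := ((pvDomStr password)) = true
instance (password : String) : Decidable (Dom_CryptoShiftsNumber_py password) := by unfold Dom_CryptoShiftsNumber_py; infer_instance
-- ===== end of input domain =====

-- B replaces A's iterative subtract-16/add-8 normalisation loop by a closed-form mod-16 reduction of the ord sum.

-- ===== PORT A =====
-- the 'while num > 16 or num < 8' loop of A, step for step; the Nat fuel only makes the
-- recursion structural (num starts at 8 + sum of ords ≥ 8, and num + 1 steps always suffice)
def cryptoLoopA : Nat → Int → Int
  | 0, num => num
  | Nat.succ fuel, num =>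
    if num > 16 ∨ num < 8 then
      let n1 := if num > 16 then num - 16 else num
      let n2 := if n1 < 8 then n1 + 8 else n1
      cryptoLoopA fuel n2
    else num

def CryptoShiftsNumber_py (password : String) : Int :=
  let num := password.toList.foldl (fun n c => n + (c.toNat : Int)) 8
  cryptoLoopA (num.toNat + 1) num

-- ===== PORT B =====
def CryptoShiftsNumber_py_alt (password : String) : Int :=
  let r := PySem.Int.mod ((password.toList.map (fun c => (c.toNat : Int))).sum) 16
  if r > 8 then r else r + 8

-- ===== PRECONDITION & SPEC =====
def Spec_CryptoShiftsNumber_py (password : String) (out : Int) : Prop := out = CryptoShiftsNumber_py_alt password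
instance (password : String) (out : Int) : Decidable (Spec_CryptoShiftsNumber_py password out) := by unfold Spec_CryptoShiftsNumber_py; infer_instance

-- ===== CLAIM (what is proved, stated in full; the proofs are below) =====
def Claim_equal_CryptoShiftsNumber_py : Prop := ∀ (password : String), Dom_CryptoShiftsNumber_py password → Spec_CryptoShiftsNumber_py password (CryptoShiftsNumber_py password)

-- ===== LEMMAS AND PROOFS =====

-- A's normalisation loop on 8 + S (S ≥ 0, with enough fuel) computes B's closed form: S % 16 lifted into [8,16]
theorem cryptoLoopA_closed (fuel : Nat) (S : Int) (hS : 0 ≤ S) (hf : S.toNat < fuel) :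
    cryptoLoopA fuel (8 + S) =
      (if PySem.Int.mod S 16 > 8 then PySem.Int.mod S 16 else PySem.Int.mod S 16 + 8) := by
  induction fuel generalizing S with
  | zero => omega
  | succ f ih =>
    have hmod : PySem.Int.mod S 16 = S % 16 := PySem.Int.mod_eq_emod_of_pos (by omega)
    rcases lt_or_ge S 16 with hlt | hge
    · have hm : S % 16 = S := Int.emod_eq_of_lt hS hlt
      rcases lt_or_ge S 9 with h8 | h8
      · -- 0 ≤ S ≤ 8 : already in range, the loop body is not entered
        simp only [cryptoLoopA, hmod, hm]
        split_ifs <;> omega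
      · -- 9 ≤ S ≤ 15 : one pass (subtract 16 then add 8) lands on 8 + (S - 8), in range
        have h1 : (8 + S > 16) = True := by simp; omega
        have h2 : (8 + S - 16 < 8) = True := by simp; omega
        have harg : 8 + S - 16 + 8 = 8 + (S - 8) := by ring
        simp only [cryptoLoopA, h1, h2, true_or, if_true, harg]
        rw [ih (S - 8) (by omega) (by omega)]
        have hm8 : PySem.Int.mod (S - 8) 16 = S - 8 := by
          rw [PySem.Int.mod_eq_emod_of_pos (by omega : (0:Int) < 16)]; omega
        rw [hm8, hmod, hm]
        split_ifs <;> omega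
    · -- S ≥ 16 : one pass reduces to 8 + (S - 16)
      have h1 : (8 + S > 16) = True := by simp; omega
      have harg : 8 + S - 16 = 8 + (S - 16) := by ring
      have h2 : (8 + (S - 16) < 8) = False := by simp; omega
      have hmod' : PySem.Int.mod (S - 16) 16 = PySem.Int.mod S 16 := by
        rw [hmod, PySem.Int.mod_eq_emod_of_pos (by omega : (0:Int) < 16)]
        omega
      simp only [cryptoLoopA, h1, true_or, if_true, harg, h2, if_false]
      rw [ih (S - 16) (by omega) (by omega), hmod']

theorem ordsum_nonneg (l : List Char) : 0 ≤ (l.map (fun c => (c.toNat : Int))).sum := by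
  apply List.sum_nonneg
  intro x hx
  simp only [List.mem_map] at hx
  obtain ⟨c, _, rfl⟩ := hx
  exact Int.natCast_nonneg _

theorem foldl_ordsum (l : List Char) (a : Int) :
    l.foldl (fun n c => n + (c.toNat : Int)) a = a + (l.map (fun c => (c.toNat : Int))).sum :=
  PySem.List.foldl_add l (fun c => (c.toNat : Int)) a

-- ===== VERDICT (by name: the statement is the Claim_ definition above) =====
theorem CryptoShiftsNumber_py_spec : Claim_equal_CryptoShiftsNumber_py := by
  intro password _
  unfold Spec_CryptoShiftsNumber_py CryptoShiftsNumber_py CryptoShiftsNumber_py_alt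
  simp only [foldl_ordsum]
  have h0 := ordsum_nonneg password.toList
  exact cryptoLoopA_closed _ _ h0 (by omega)
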